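-- pv_equiv track=rewrite | github.com/Treyson-Grange/AdventOfCode | Day6/main.py | findMarkerIndex
-- ===== SOURCE A (Python) =====
-- def findMarkerIndex(line, packetSize):
-- 	char = list(line.replace("\n", ""))
-- 	index = 0
-- 	while(index < len(char)):
-- 		currentSet = char[index:index + packetSize]
-- 		if(len(set(currentSet)) == len(currentSet)):
-- 			return index + packetSize
-- 		index += 1
-- 	return -1
-- ===== SOURCE B (Python) =====
-- def findMarkerIndex(line, packetSize):
--     s = line.replace("\n", "")
--     n = len(s)
--     # nearest[i]: smallest q such that some p with i <= p < q has s[p] == s[q]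
--     # (None if the suffix s[i:] has no repeated character); one right-to-left pass.
--     nearest = [None] * n
--     seen = {}
--     m = None
--     for p in range(n - 1, -1, -1):
--         if s[p] in seen:
--             q = seen[s[p]]
--             if m is None or q < m:
--                 m = q
--         seen[s[p]] = p
--         nearest[p] = m
--     # the window starting at i is duplicate-free iff its nearest repeat ends at or
--     # beyond the window's end
--     for i in range(n):
--         if nearest[i] is None or nearest[i] >= i + packetSize:
--             return i + packetSize
--     return -1
-- ===== Notes on version B (the rewrite author's own statement) =====
-- stated objective: faster
-- what changed: A re-slices and builds a fresh set at every index (O(n*k)); B makes one right-to-left pass computing for every position the nearest duplicate-pair end in the suffix, then one forward scan returning the first index whose window ends before that. Pre_ excludes negative packetSize, where A's value is an artefact of Python's negative-slice semantics rather than any window of size packetSize.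
-- outside the precondition, e.g. on findMarkerIndex('aab', -1): A returns 0, B returns -1
import Mathlib
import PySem

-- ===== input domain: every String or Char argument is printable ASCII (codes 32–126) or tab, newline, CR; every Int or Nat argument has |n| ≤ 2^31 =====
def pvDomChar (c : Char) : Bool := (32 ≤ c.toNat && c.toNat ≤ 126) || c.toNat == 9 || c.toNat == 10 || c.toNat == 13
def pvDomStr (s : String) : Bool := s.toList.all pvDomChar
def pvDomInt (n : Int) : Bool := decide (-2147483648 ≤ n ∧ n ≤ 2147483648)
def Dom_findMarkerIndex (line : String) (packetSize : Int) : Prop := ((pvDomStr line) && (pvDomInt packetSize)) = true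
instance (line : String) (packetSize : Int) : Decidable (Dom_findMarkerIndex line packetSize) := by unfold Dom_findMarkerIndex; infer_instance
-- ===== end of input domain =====

-- B replaces A's per-index slice-and-set rescan with two linear passes: a right-to-left pass
-- recording, for every position, the nearest duplicate-pair end in the suffix, then a forward
-- scan for the first index whose window ends before that (objective: faster).

-- ===== PORT A =====
-- while loop of A: index scans forward; at each index the slice char[index:index + packetSize]
-- is materialised and tested for distinctness via set()
def pvLoopA (char : List Char) (packetSize : Int) (index : Nat) : Int :=
  if h : index < char.length then
    let currentSet := PySem.List.slice char (some (index : Int)) (some ((index : Int) + packetSize))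
    if (PySem.Set.ofList currentSet).length = currentSet.length then (index : Int) + packetSize
    else pvLoopA char packetSize (index + 1)
  else -1
termination_by char.length - index
decreasing_by omega

def findMarkerIndex (line : String) (packetSize : Int) : Int :=
  pvLoopA (PySem.Str.replace line "\n" "").toList packetSize 0

-- ===== PORT B =====
-- Python's inner `if s[p] in seen: q = seen[s[p]]; if m is None or q < m: m = q`
def pvUpd (q? : Option Int) (m : Option Int) : Option Int :=
  match q?, m with
  | some q, none => some q
  | some q, some mv => if q < mv then some q else some mv
  | none, _ => m

-- first loop of B: p runs n-1 … 0; seen[c] = leftmost index ≥ p+1 holding c; m = nearest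
-- duplicate-pair end in s[p:]; the list built is B's `nearest` array (filled right to left)
def pvP1 (s : List Char) : Nat → PySem.Dict Char Int → Option Int → List (Option Int)
  | 0, _seen, _m => []
  | p + 1, seen, m =>
    pvP1 s p (seen.insert (s.getD p default) (p : Int)) (pvUpd (seen.get? (s.getD p default)) m)
      ++ [pvUpd (seen.get? (s.getD p default)) m]

-- second loop of B: first i whose nearest repeat ends at or beyond the window's end
def pvP2 (packetSize : Int) : List (Int × Option Int) → Int
  | [] => -1
  | (i, none) :: _rest => i + packetSize
  | (i, some mv) :: rest => if i + packetSize ≤ mv then i + packetSize else pvP2 packetSize rest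

def findMarkerIndex_alt (line : String) (packetSize : Int) : Int :=
  let s := (PySem.Str.replace line "\n" "").toList
  let nearest := pvP1 s s.length PySem.Dict.empty none
  pvP2 packetSize (PySem.List.enumerate nearest 0)

-- ===== PRECONDITION & SPEC =====
-- Pre_ excludes negative packetSize, where A's result reflects Python's negative-slice
-- semantics (char[index:index+packetSize] drops trailing characters) rather than any window
-- of size packetSize.
def Pre_findMarkerIndex (line : String) (packetSize : Int) : Prop := 0 ≤ packetSize
instance (line : String) (packetSize : Int) : Decidable (Pre_findMarkerIndex line packetSize) := by unfold Pre_findMarkerIndex; infer_instance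
def pvWitness_findMarkerIndex : String × Int := ("mjqjpqmgbljsphdztnvjfqwrcgsmlb", 4)

def Spec_findMarkerIndex (line : String) (packetSize : Int) (out : Int) : Prop := out = findMarkerIndex_alt line packetSize
instance (line : String) (packetSize : Int) (out : Int) : Decidable (Spec_findMarkerIndex line packetSize out) := by unfold Spec_findMarkerIndex; infer_instance

-- ===== CLAIM (what is proved, stated in full; the proofs are below) =====
def Claim_equal_findMarkerIndex : Prop := ∀ (line : String) (packetSize : Int), Dom_findMarkerIndex line packetSize → Pre_findMarkerIndex line packetSize → Spec_findMarkerIndex line packetSize (findMarkerIndex line packetSize)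

-- ===== LEMMAS AND PROOFS =====

-- len(set(xs)) == len(xs) is exactly Nodup
theorem pvSetLen_iff (xs : List Char) : (PySem.Set.ofList xs).length = xs.length ↔ xs.Nodup := by
  constructor
  · intro h
    have hperm : List.Perm (PySem.Set.ofList xs) xs.dedup := by
      refine List.perm_of_nodup_nodup_toFinset_eq (PySem.Set.nodup_ofList xs) xs.nodup_dedup ?_
      ext c
      simp [PySem.Set.mem_ofList, List.mem_dedup]
    have hlen : xs.dedup.length = xs.length := by rw [← hperm.length_eq, h]
    have heq : xs.dedup = xs := (xs.dedup_sublist).eq_of_length hlen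
    rw [← heq]; exact xs.nodup_dedup
  · intro h; rw [PySem.Set.ofList_eq_self_of_nodup xs h]

-- q is the end of a duplicate pair lying wholly in s[i:]
def pvDupB (s : List Char) (i q : Nat) : Bool :=
  decide (q < s.length) && (List.range q).any (fun p => decide (i ≤ p) && (s[p]? == s[q]?))

theorem pvDupB_iff (s : List Char) (i q : Nat) :
    pvDupB s i q = true ↔ (q < s.length ∧ ∃ p, i ≤ p ∧ p < q ∧ s[p]? = s[q]?) := by
  simp [pvDupB, List.any_eq_true, List.mem_range]
  tauto

-- the value B's `nearest[i]` holds: least dup-pair end in s[i:]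
def pvMinQ (s : List Char) (i : Nat) : Option Nat := (List.range s.length).find? (pvDupB s i)

-- the value B's `seen[c]` holds after processing indices ≥ p: least q ≥ p with s[q] = c
def pvNxt (s : List Char) (p : Nat) (c : Char) : Option Nat :=
  (List.range s.length).find? (fun q => decide (p ≤ q) && (s[q]? == some c))

-- find? over range n finds the least index satisfying f
theorem pvFindRange_some (n : Nat) (f : Nat → Bool) : ∀ q : Nat,
    (List.range n).find? f = some q ↔ (q < n ∧ f q = true ∧ ∀ r < q, f r = false) := by
  induction n with
  | zero => intro q; simp
  | succ n ih =>
    intro q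
    rw [List.range_succ, List.find?_append]
    cases hfa : (List.range n).find? f with
    | some q' =>
      have h' := (ih q').mp hfa
      simp only [Option.some_or]
      constructor
      · intro h
        injection h with h
        subst h
        exact ⟨by omega, h'.2.1, h'.2.2⟩
      · rintro ⟨hq, hfq, hmin⟩
        have hq'q : q' = q := by
          by_contra hne
          rcases Nat.lt_or_ge q' q with hlt | hge
          · have h2 := hmin q' hlt
            rw [h'.2.1] at h2
            cases h2
          · have hlt : q < q' := by omega
            have h2 := h'.2.2 q hlt
            rw [hfq] at h2
            cases h2
        rw [hq'q]
    | none =>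
      have hnone : ∀ r < n, f r = false := by
        intro r hr
        have := List.find?_eq_none.mp hfa r (List.mem_range.mpr hr)
        simpa using this
      simp only [Option.none_or, List.find?_singleton]
      constructor
      · intro h
        split at h
        · rename_i hfn
          injection h with h
          subst h
          exact ⟨Nat.lt_succ_self _, hfn, hnone⟩
        · cases h
      · rintro ⟨hq, hfq, hmin⟩
        have hqn : q = n := by
          rcases Nat.lt_or_ge q n with h2 | h2
          · rw [hnone q h2] at hfq; cases hfq
          · omega
        subst hqn
        rw [if_pos hfq]

theorem pvFindRange_none (n : Nat) (f : Nat → Bool) :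
    (List.range n).find? f = none ↔ ∀ r < n, f r = false := by
  rw [List.find?_eq_none]
  constructor
  · intro h r hr
    have := h r (List.mem_range.mpr hr)
    simpa using this
  · intro h x hx
    rw [h x (List.mem_range.mp hx)]
    simp

-- the window s[i : i+K] (clipped at the end) is duplicate-free iff every dup-pair end in
-- s[i:] lies at or beyond i + K
theorem pvWindow_iff (s : List Char) (i K : Nat) :
    ((s.drop i).take K).Nodup ↔ ∀ q, pvDupB s i q = true → i + K ≤ q := by
  have hget : ∀ j : Nat, ((s.drop i).take K)[j]? = if j < K then s[i + j]? else none := by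
    intro j
    rw [List.getElem?_take]
    split
    · rw [List.getElem?_drop]
    · rfl
  have hlen : ((s.drop i).take K).length = min K (s.length - i) := by simp
  rw [List.nodup_iff_getElem?_ne_getElem?]
  constructor
  · intro h q hq
    rw [pvDupB_iff] at hq
    obtain ⟨hqn, p, hip, hpq, heq⟩ := hq
    by_contra hlt
    have h2 := h (p - i) (q - i) (by omega) (by omega)
    rw [hget, hget, if_pos (by omega), if_pos (by omega)] at h2
    have e1 : i + (p - i) = p := by omega
    have e2 : i + (q - i) = q := by omega
    rw [e1, e2] at h2
    exact h2 heq
  · intro h j1 j2 hj hj2 heq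
    rw [hget, hget, if_pos (by rw [hlen] at hj2; omega), if_pos (by rw [hlen] at hj2; omega)] at heq
    have hdup : pvDupB s i (i + j2) = true := by
      rw [pvDupB_iff]
      exact ⟨by rw [hlen] at hj2; omega, i + j1, by omega, by omega, heq⟩
    have := h _ hdup
    rw [hlen] at hj2
    omega

-- least i with s[i:i+K] duplicate-free (the index A's scan stops at)
def pvFirst (s : List Char) (K : Nat) : Nat :=
  Nat.find (p := fun i => ((s.drop i).take K).Nodup) ⟨s.length, by simp⟩

theorem pvFirst_nodup (s : List Char) (K : Nat) : ((s.drop (pvFirst s K)).take K).Nodup :=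
  Nat.find_spec (p := fun i => ((s.drop i).take K).Nodup) ⟨s.length, by simp⟩

theorem pvFirst_le (s : List Char) (K i : Nat) (h : ((s.drop i).take K).Nodup) :
    pvFirst s K ≤ i := Nat.find_le h

theorem pvFirst_min (s : List Char) (K i : Nat) (h : i < pvFirst s K) :
    ¬ ((s.drop i).take K).Nodup :=
  Nat.find_min (p := fun i => ((s.drop i).take K).Nodup) ⟨s.length, by simp⟩ h

theorem pvFirst_lt (s : List Char) (K : Nat) (hs : s ≠ []) :
    pvFirst s K < s.length := by
  have hn : 0 < s.length := List.length_pos_iff.mpr hs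
  rcases K with _ | K'
  · have : ((s.drop 0).take 0).Nodup := by simp
    have := pvFirst_le s 0 0 this
    omega
  · have hlast : s.drop (s.length - 1) = [s[s.length - 1]] := by
      rw [List.drop_eq_getElem_cons (by omega)]
      have he : s.length - 1 + 1 = s.length := by omega
      rw [he, List.drop_length]
    have : ((s.drop (s.length - 1)).take (K' + 1)).Nodup := by
      rw [hlast]; simp
    have := pvFirst_le s (K' + 1) _ this
    omega

-- A's loop returns pvFirst + K (for a nonempty string; K ≥ 0 cast from Nat)
theorem pvLoopA_eq (s : List Char) (K : Nat) (hs : s ≠ []) :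
    ∀ idx, idx ≤ pvFirst s K → pvLoopA s (K : Int) idx = (pvFirst s K : Int) + (K : Int) := by
  have hlt := pvFirst_lt s K hs
  intro idx hidx
  induction hd : (pvFirst s K - idx) generalizing idx with
  | zero =>
    have hidx' : idx = pvFirst s K := by omega
    rw [pvLoopA, dif_pos (by omega)]
    have hsl : PySem.List.slice s (some (idx : Int)) (some ((idx : Int) + (K : Int)))
        = (s.drop idx).take K := PySem.List.slice_natCast_add s idx K
    rw [hsl, if_pos (by rw [pvSetLen_iff, hidx']; exact pvFirst_nodup s K), hidx']
  | succ d ih =>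
    rw [pvLoopA, dif_pos (by omega)]
    have hsl : PySem.List.slice s (some (idx : Int)) (some ((idx : Int) + (K : Int)))
        = (s.drop idx).take K := PySem.List.slice_natCast_add s idx K
    rw [hsl, if_neg]
    · have := ih (idx + 1) (by omega) (by omega)
      simpa [Nat.cast_add] using this
    · rw [pvSetLen_iff]
      exact pvFirst_min s K idx (by omega)

-- splitting a dup-pair end over start p vs start p+1
theorem pvDupB_split (s : List Char) (p q : Nat) (hp : p < s.length) :
    pvDupB s p q = true ↔
      (pvDupB s (p + 1) q = true ∨ (p < q ∧ q < s.length ∧ s[q]? = s[p]?)) := by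
  rw [pvDupB_iff, pvDupB_iff]
  constructor
  · rintro ⟨hq, p', hip, hpq, heq⟩
    by_cases hpp : p' = p
    · subst hpp; exact Or.inr ⟨hpq, hq, heq.symm⟩
    · exact Or.inl ⟨hq, p', by omega, hpq, heq⟩
  · rintro (⟨hq, p', hip, hpq, heq⟩ | ⟨hpq, hq, heq⟩)
    · exact ⟨hq, p', by omega, hpq, heq⟩
    · exact ⟨hq, p, le_refl p, hpq, heq.symm⟩

-- find? congruence over a list
theorem pvFind?_congr {a : Type} (l : List a) (f g : a → Bool) (h : ∀ x ∈ l, f x = g x) :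
    l.find? f = l.find? g := by
  induction l with
  | nil => rfl
  | cons x t ih =>
    by_cases hx : g x = true
    · rw [List.find?_cons_of_pos (by rw [h x (List.mem_cons_self)]; exact hx),
        List.find?_cons_of_pos hx]
    · rw [List.find?_cons_of_neg (by rw [h x (List.mem_cons_self)]; simpa using hx),
        List.find?_cons_of_neg (by simpa using hx)]
      exact ih (fun y hy => h y (List.mem_cons_of_mem _ hy))

-- the step of pass 1: the new m is the least dup-pair end from p
theorem pvMinQ_step (s : List Char) (p : Nat) (hp : p < s.length) :
    pvMinQ s p =
      (match pvNxt s (p + 1) s[p], pvMinQ s (p + 1) with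
      | some q, none => some q
      | some q, some mv => if q < mv then some q else some mv
      | none, mo => mo) := by
  have hspget : s[p]? = some s[p] := List.getElem?_eq_getElem hp
  rcases hN : pvNxt s (p + 1) s[p] with _ | b <;> rcases hM : pvMinQ s (p + 1) with _ | a
  · -- none, none: no dup at all from p
    simp only
    rw [pvMinQ, pvFindRange_none]
    intro r hr
    by_contra hc
    have hc' : pvDupB s p r = true := by
      cases h : pvDupB s p r
      · exact absurd h hc
      · rfl
    rw [pvDupB_split s p r hp] at hc'
    rcases hc' with h | ⟨h1, h2, h3⟩
    · rw [pvMinQ, pvFindRange_none] at hM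
      rw [hM r hr] at h; cases h
    · rw [pvNxt, pvFindRange_none] at hN
      have h5 := hN r hr
      simp only [Bool.and_eq_false_iff] at h5
      rcases h5 with h4 | h4
      · simp at h4; omega
      · simp at h4; exact h4 (by rw [h3, hspget])
  · -- nxt none, minQ some a
    simp only
    rw [pvMinQ, pvFindRange_some]
    rw [pvMinQ, pvFindRange_some] at hM
    obtain ⟨ha, hfa, hmin⟩ := hM
    refine ⟨ha, ?_, ?_⟩
    · rw [pvDupB_split s p a hp]; exact Or.inl hfa
    · intro r hr
      by_contra hc
      have hc' : pvDupB s p r = true := by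
        cases h : pvDupB s p r
        · exact absurd h hc
        · rfl
      rw [pvDupB_split s p r hp] at hc'
      rcases hc' with h | ⟨h1, h2, h3⟩
      · rw [hmin r hr] at h; cases h
      · rw [pvNxt, pvFindRange_none] at hN
        have h5 := hN r h2
        simp only [Bool.and_eq_false_iff] at h5
        rcases h5 with h4 | h4
        · simp at h4; omega
        · simp at h4; exact h4 (by rw [h3, hspget])
  · -- nxt some b, minQ none
    simp only
    rw [pvMinQ, pvFindRange_some]
    rw [pvNxt, pvFindRange_some] at hN
    obtain ⟨hb, hfb, hminb⟩ := hN
    simp only [Bool.and_eq_true, decide_eq_true_eq, beq_iff_eq] at hfb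
    refine ⟨hb, ?_, ?_⟩
    · rw [pvDupB_split s p b hp]
      exact Or.inr ⟨by omega, hb, by rw [hfb.2, hspget]⟩
    · intro r hr
      by_contra hc
      have hc' : pvDupB s p r = true := by
        cases h : pvDupB s p r
        · exact absurd h hc
        · rfl
      rw [pvDupB_split s p r hp] at hc'
      rcases hc' with h | ⟨h1, h2, h3⟩
      · rw [pvMinQ, pvFindRange_none] at hM
        rw [hM r ((pvDupB_iff s (p+1) r).mp h).1] at h; cases h
      · have h5 := hminb r hr
        simp only [Bool.and_eq_false_iff] at h5
        rcases h5 with h4 | h4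
        · simp at h4; omega
        · simp at h4; exact h4 (by rw [h3, hspget])
  · -- nxt some b, minQ some a
    simp only
    rw [pvNxt, pvFindRange_some] at hN
    rw [pvMinQ, pvFindRange_some] at hM
    obtain ⟨hb, hfb, hminb⟩ := hN
    obtain ⟨ha, hfa, hmina⟩ := hM
    simp only [Bool.and_eq_true, decide_eq_true_eq, beq_iff_eq] at hfb
    have hdupb : pvDupB s p b = true := by
      rw [pvDupB_split s p b hp]
      exact Or.inr ⟨by omega, hb, by rw [hfb.2, hspget]⟩
    have hdupa : pvDupB s p a = true := by
      rw [pvDupB_split s p a hp]; exact Or.inl hfa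
    have hminp : ∀ r, r < a → r < b → pvDupB s p r = false := by
      intro r hra hrb
      by_contra hc
      have hc' : pvDupB s p r = true := by
        cases h : pvDupB s p r
        · exact absurd h hc
        · rfl
      rw [pvDupB_split s p r hp] at hc'
      rcases hc' with h | ⟨h1, h2, h3⟩
      · rw [hmina r hra] at h; cases h
      · have h5 := hminb r hrb
        simp only [Bool.and_eq_false_iff] at h5
        rcases h5 with h4 | h4
        · simp at h4; omega
        · simp at h4; exact h4 (by rw [h3, hspget])
    split_ifs with hba
    · rw [pvMinQ, pvFindRange_some]
      exact ⟨hb, hdupb, fun r hr => hminp r (by omega) hr⟩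
    · rw [pvMinQ, pvFindRange_some]
      exact ⟨ha, hdupa, fun r hr => hminp r hr (by omega)⟩

-- pass 1 invariant: with seen and m correct for start p, pvP1 produces the nearest array
theorem pvP1_eq (s : List Char) :
    ∀ p, p ≤ s.length →
    ∀ (seen : PySem.Dict Char Int) (m : Option Int),
    (∀ c, seen.get? c = (pvNxt s p c).map (Nat.cast : Nat → Int)) →
    m = (pvMinQ s p).map (Nat.cast : Nat → Int) →
    pvP1 s p seen m = (List.range p).map (fun i => (pvMinQ s i).map (Nat.cast : Nat → Int)) := by
  intro p
  induction p with
  | zero => intro _ _ _ _ _; rfl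
  | succ p ih =>
    intro hp seen m hseen hm
    have hplt : p < s.length := by omega
    have hc : s.getD p default = s[p] := List.getD_eq_getElem s default hplt
    have hm' : pvUpd (seen.get? (s.getD p default)) m
        = (pvMinQ s p).map (Nat.cast : Nat → Int) := by
      rw [hc, hseen s[p], hm, pvMinQ_step s p hplt]
      rcases pvNxt s (p + 1) s[p] with _ | b <;> rcases pvMinQ s (p + 1) with _ | a
      · rfl
      · rfl
      · rfl
      · simp only [Option.map_some, pvUpd]
        by_cases hba : b < a
        · rw [if_pos (by exact_mod_cast hba), if_pos hba]
          rfl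
        · rw [if_neg (by exact_mod_cast hba), if_neg hba]
          rfl
    have hseen' : ∀ c', (seen.insert (s.getD p default) (p : Int)).get? c'
        = (pvNxt s p c').map (Nat.cast : Nat → Int) := by
      intro c'
      rw [hc, PySem.Dict.get?_insert]
      by_cases hcc : c' = s[p]
      · rw [if_pos hcc]
        have : pvNxt s p c' = some p := by
          rw [pvNxt, pvFindRange_some]
          refine ⟨hplt, ?_, ?_⟩
          · simp [List.getElem?_eq_getElem hplt, hcc]
          · intro r hr; simp; omega
        rw [this]; rfl
      · rw [if_neg hcc, hseen c']
        congr 1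
        rw [pvNxt, pvNxt]
        apply pvFind?_congr
        intro q _
        by_cases hqp : q = p
        · subst hqp
          simp [List.getElem?_eq_getElem hplt]
          intro h
          exact absurd h.symm hcc
        · by_cases hpq : p ≤ q
          · have e1 : decide (p ≤ q) = true := by simp; omega
            have e2 : decide (p + 1 ≤ q) = true := by simp; omega
            rw [e1, e2]
          · have e1 : decide (p ≤ q) = false := by simp; omega
            have e2 : decide (p + 1 ≤ q) = false := by simp; omega
            rw [e1, e2]
    rw [pvP1, hm', ih (by omega) _ _ hseen' rfl, List.range_succ, List.map_append]
    rfl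

-- pass 2: starting at index j ≤ pvFirst, the scan stops exactly at pvFirst
theorem pvP2_eq (s : List Char) (K : Nat) (hs : s ≠ []) :
    ∀ j, j ≤ pvFirst s K →
      pvP2 (K : Int)
        (PySem.List.enumerate
          (((List.range s.length).map (fun i => (pvMinQ s i).map (Nat.cast : Nat → Int))).drop j)
          (j : Int))
        = (pvFirst s K : Int) + (K : Int) := by
  have hlt := pvFirst_lt s K hs
  intro j hj
  set L := (List.range s.length).map (fun i => (pvMinQ s i).map (Nat.cast : Nat → Int)) with hL
  have hlenL : L.length = s.length := by simp [hL]
  induction hd : (pvFirst s K - j) generalizing j with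
  | zero =>
    have hje : j = pvFirst s K := by omega
    subst hje
    have hjL : pvFirst s K < L.length := by omega
    have hgetL : L[pvFirst s K]'hjL = (pvMinQ s (pvFirst s K)).map (Nat.cast : Nat → Int) := by
      simp [hL]
    rw [List.drop_eq_getElem_cons hjL, PySem.List.enumerate_cons]
    have hnod := (pvWindow_iff s (pvFirst s K) K).mp (pvFirst_nodup s K)
    rcases hQ : pvMinQ s (pvFirst s K) with _ | mv
    · rw [hQ] at hgetL
      simp only [Option.map_none] at hgetL
      rw [hgetL, pvP2]
    · rw [hQ] at hgetL
      simp only [Option.map_some] at hgetL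
      rw [hgetL, pvP2, if_pos]
      rw [pvMinQ, pvFindRange_some] at hQ
      have := hnod mv hQ.2.1
      exact_mod_cast this
  | succ d ih =>
    have hjlt : j < s.length := by omega
    have hjL : j < L.length := by omega
    have hgetL : L[j]'hjL = (pvMinQ s j).map (Nat.cast : Nat → Int) := by
      simp [hL]
    rw [List.drop_eq_getElem_cons hjL, PySem.List.enumerate_cons]
    have hbad := pvFirst_min s K j (by omega)
    rw [pvWindow_iff] at hbad
    push Not at hbad
    obtain ⟨q, hq, hqlt⟩ := hbad
    rcases hQ : pvMinQ s j with _ | mv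
    · exfalso
      rw [pvMinQ, pvFindRange_none] at hQ
      rw [hQ q ((pvDupB_iff s j q).mp hq).1] at hq; cases hq
    · rw [hQ] at hgetL
      simp only [Option.map_some] at hgetL
      rw [hgetL, pvP2, if_neg]
      · have hcast : ((j : Int) + 1) = (((j + 1 : Nat)) : Int) := by push_cast; ring
        rw [hcast]
        exact ih (j + 1) (by omega) (by omega)
      · rw [pvMinQ, pvFindRange_some] at hQ
        have hmvq : mv ≤ q := by
          by_contra hc
          rw [hQ.2.2 q (by omega)] at hq; cases hq
        have : mv < j + K := by omega
        intro hcon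
        have : (j : Int) + (K : Int) ≤ (mv : Int) := hcon
        omega

-- ===== VERDICT (by name: the statement is the Claim_ definition above) =====
theorem findMarkerIndex_spec : Claim_equal_findMarkerIndex := by
  intro line k _hdom hpre
  unfold Spec_findMarkerIndex findMarkerIndex findMarkerIndex_alt
  obtain ⟨K, rfl⟩ : ∃ K : Nat, k = (K : Int) :=
    ⟨k.toNat, (Int.toNat_of_nonneg hpre).symm⟩
  set s := (PySem.Str.replace line "\n" "").toList with hsdef
  show pvLoopA s (K : Int) 0
      = pvP2 (K : Int) (PySem.List.enumerate (pvP1 s s.length PySem.Dict.empty none) 0)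
  have hP1 : pvP1 s s.length PySem.Dict.empty none
      = (List.range s.length).map (fun i => (pvMinQ s i).map (Nat.cast : Nat → Int)) := by
    refine pvP1_eq s s.length (le_refl _) _ _ ?_ ?_
    · intro c
      rw [PySem.Dict.get?_empty]
      have : pvNxt s s.length c = none := by
        rw [pvNxt, pvFindRange_none]
        intro r hr; simp; omega
      rw [this]; rfl
    · have : pvMinQ s s.length = none := by
        rw [pvMinQ, pvFindRange_none]
        intro r hr
        cases h : pvDupB s s.length r
        · rfl
        · obtain ⟨h1, p, h2, h3, _⟩ := (pvDupB_iff s s.length r).mp h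
          omega
      rw [this]; rfl
  rcases hse : s.isEmpty with _ | _
  · -- s nonempty
    have hs : s ≠ [] := by intro h; rw [h] at hse; simp at hse
    rw [pvLoopA_eq s K hs 0 (Nat.zero_le _), hP1]
    have h0 : ((List.range s.length).map (fun i => (pvMinQ s i).map (Nat.cast : Nat → Int)))
        = ((List.range s.length).map (fun i => (pvMinQ s i).map (Nat.cast : Nat → Int))).drop 0 := rfl
    rw [h0]
    have := pvP2_eq s K hs 0 (Nat.zero_le _)
    simpa using this.symm
  · -- s empty
    have hnil : s = [] := by simpa [List.isEmpty_iff] using hse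
    rw [hP1, hnil]
    simp [pvLoopA, pvP2, PySem.List.enumerate_nil]
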